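-- pv_equiv track=rewrite | github.com/Nathan-Cherny/Bairs-Bot | upsetFactor.py | returnPlacementsByAttendees
-- ===== SOURCE A (Python) =====
-- def returnPlacementsByAttendees(attendeeCount):
--     placements = [
--         1,
--         2,
--         3,
--         4
--     ]
--
--     placement = 5
--     factor = 2
--
--     while placements.__len__() < attendeeCount:
--         for i in range(factor): # first loop in pair (5 in the pair of 5 and 7)
--             placements.append(placement)
--         for i in range(factor): # second loop in pair (7 in the pair of 5 and 7) and account for factor
--             placements.append(placement + factor)
--         factor = factor * 2
--         placement = placement + factor
--
--     placements = placements[:attendeeCount]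
--     return placements
-- ===== SOURCE B (Python) =====
-- def returnPlacementsByAttendees(attendeeCount):
--     def value(i):
--         if i < 4:
--             return i + 1
--         half = 1 << (i.bit_length() - 2)      # 2**m where the block [2*half, 4*half) starts
--         return 2 * half + 1 if i < 3 * half else 3 * half + 1
--     n = max(4, attendeeCount)
--     return [value(i) for i in range(n)][:attendeeCount]
-- ===== Notes on version B (the rewrite author's own statement) =====
-- stated objective: alternative
-- what changed: Replaces the sequential while-loop that grows the list block by doubling block with a closed-form per-index formula (bit_length arithmetic) mapped over range(max(4, n)) and sliced.
import Mathlib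
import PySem

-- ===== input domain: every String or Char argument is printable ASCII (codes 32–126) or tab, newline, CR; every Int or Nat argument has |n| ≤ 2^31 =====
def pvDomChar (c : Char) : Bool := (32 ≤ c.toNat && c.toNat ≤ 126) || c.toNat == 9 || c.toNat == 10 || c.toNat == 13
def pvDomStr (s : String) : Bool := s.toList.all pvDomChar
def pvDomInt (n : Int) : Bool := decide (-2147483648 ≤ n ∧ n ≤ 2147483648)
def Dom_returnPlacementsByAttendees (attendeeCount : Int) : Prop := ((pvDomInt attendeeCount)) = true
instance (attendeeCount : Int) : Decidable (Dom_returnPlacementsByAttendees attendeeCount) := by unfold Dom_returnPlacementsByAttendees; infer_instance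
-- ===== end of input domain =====

-- B replaces A's sequential doubling-block while-loop by a closed-form per-index
-- formula (bit_length arithmetic) mapped over range(max(4, n)); same cost, different algorithm.

-- ===== PORT A =====
-- the while-loop; the proof argument 0 < factor only justifies termination (factor is 2,4,8,… in every call)
def pvLoopA (n : Int) (placements : List Int) (placement factor : Int) (hf : 0 < factor) : List Int :=
  if (placements.length : Int) < n then
    pvLoopA n
      (placements ++ List.replicate factor.toNat placement
                  ++ List.replicate factor.toNat (placement + factor))
      (placement + factor * 2) (factor * 2) (by omega)
  else placements
termination_by n.toNat - placements.length
decreasing_by simp only [List.length_append, List.length_replicate]; omega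

def returnPlacementsByAttendees (attendeeCount : Int) : List Int :=
  PySem.List.slice (pvLoopA attendeeCount [1, 2, 3, 4] 5 2 (by norm_num)) none (some attendeeCount)

-- ===== PORT B =====
-- value(i): closed-form placement for index i
def pvValue (i : Int) : Int :=
  if i < 4 then i + 1
  else
    let half : Int := 1 <<< (PySem.Int.bitLength i - 2)
    if i < 3 * half then 2 * half + 1 else 3 * half + 1

def returnPlacementsByAttendees_alt (attendeeCount : Int) : List Int :=
  PySem.List.slice ((PySem.List.pyRange 0 (max 4 attendeeCount) 1).map pvValue)
    none (some attendeeCount)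

-- ===== PRECONDITION & SPEC =====
def Spec_returnPlacementsByAttendees (attendeeCount : Int) (out : List Int) : Prop := out = returnPlacementsByAttendees_alt attendeeCount
instance (attendeeCount : Int) (out : List Int) : Decidable (Spec_returnPlacementsByAttendees attendeeCount out) := by unfold Spec_returnPlacementsByAttendees; infer_instance

-- ===== CLAIM (what is proved, stated in full; the proofs are below) =====
def Claim_equal_returnPlacementsByAttendees : Prop := ∀ (attendeeCount : Int), Dom_returnPlacementsByAttendees attendeeCount → Spec_returnPlacementsByAttendees attendeeCount (returnPlacementsByAttendees attendeeCount)

-- ===== LEMMAS AND PROOFS =====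

-- the infinite placement sequence, cut at length L
def pvVals (L : Nat) : List Int := (List.range L).map (fun i : Nat => pvValue i)

lemma pvVals_length (L : Nat) : (pvVals L).length = L := by
  simp [pvVals]

lemma pvVals_take {k L : Nat} (h : k ≤ L) : (pvVals L).take k = pvVals k := by
  rw [pvVals, pvVals, ← List.map_take, List.take_range, Nat.min_eq_left h]

lemma pvBitLength_window (j : Nat) (i : Int)
    (h1 : (2 ^ (j + 2) : Int) ≤ i) (h2 : i < (2 ^ (j + 3) : Int)) :
    PySem.Int.bitLength i = j + 3 := by
  have hipos : (0 : Int) < i := lt_of_lt_of_le (by positivity) h1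
  have habs : (i.natAbs : Int) = i := Int.natAbs_of_nonneg hipos.le
  have hlow : (2 : Nat) ^ (j + 2) ≤ i.natAbs := by exact_mod_cast habs.symm ▸ h1
  have hhigh : i.natAbs < (2 : Nat) ^ (j + 3) := by exact_mod_cast habs.symm ▸ h2
  have hi0 : i ≠ 0 := hipos.ne'
  have h3 := PySem.Int.lt_two_pow_bitLength i
  have h4 := PySem.Int.two_pow_bitLength_le i hi0
  have hub : PySem.Int.bitLength i - 1 < j + 3 :=
    (Nat.pow_lt_pow_iff_right (by norm_num)).mp (lt_of_le_of_lt h4 hhigh)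
  have hlb : j + 2 < PySem.Int.bitLength i :=
    (Nat.pow_lt_pow_iff_right (by norm_num)).mp (lt_of_le_of_lt hlow h3)
  omega

lemma pvValue_window (j : Nat) (i : Int)
    (h1 : (2 ^ (j + 2) : Int) ≤ i) (h2 : i < (2 ^ (j + 3) : Int)) :
    pvValue i = if i < 3 * 2 ^ (j + 1) then 2 ^ (j + 2) + 1 else 3 * 2 ^ (j + 1) + 1 := by
  have h4 : ¬ i < 4 := by
    have : (4 : Int) ≤ 2 ^ (j + 2) := by
      calc (4 : Int) = 2 ^ 2 := by norm_num
      _ ≤ 2 ^ (j + 2) := by apply pow_le_pow_right₀ <;> omega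
    omega
  rw [pvValue, if_neg h4, pvBitLength_window j i h1 h2]
  show (if i < 3 * ((1 : Int) <<< (j + 3 - 2)) then 2 * ((1 : Int) <<< (j + 3 - 2)) + 1
        else 3 * ((1 : Int) <<< (j + 3 - 2)) + 1) = _
  have hh : (1 : Int) <<< (j + 3 - 2) = 2 ^ (j + 1) := by
    show (1 : Int) <<< (j + 1) = 2 ^ (j + 1)
    simp [Int.shiftLeft_eq]
  rw [hh]
  have : (2 : Int) * 2 ^ (j + 1) = 2 ^ (j + 2) := by ring
  rw [this]

-- one loop iteration appends exactly the next window of pvVals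
lemma pvVals_block (j : Nat) :
    pvVals (2 ^ (j + 3)) =
      pvVals (2 ^ (j + 2)) ++ List.replicate (2 ^ (j + 1)) ((2 ^ (j + 2) : Int) + 1)
        ++ List.replicate (2 ^ (j + 1)) ((2 ^ (j + 2) : Int) + 1 + 2 ^ (j + 1)) := by
  have hsplit : (2 : Nat) ^ (j + 3) = 2 ^ (j + 2) + (2 ^ (j + 1) + 2 ^ (j + 1)) := by
    ring
  rw [pvVals, hsplit, List.range_add, List.map_append, List.range_add, List.map_map,
    List.map_append, List.map_map, List.append_assoc]
  congr 1
  congr 1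
  · rw [List.eq_replicate_iff]
    refine ⟨by simp, ?_⟩
    intro x hx
    rw [List.mem_map] at hx
    obtain ⟨k, hk, rfl⟩ := hx
    rw [List.mem_range] at hk
    have hk' : (k : Int) < 2 ^ (j + 1) := by exact_mod_cast hk
    have h1 : (2 ^ (j + 2) : Int) ≤ ((2 ^ (j + 2) + k : Nat) : Int) := by push_cast; omega
    have h2 : ((2 ^ (j + 2) + k : Nat) : Int) < (2 ^ (j + 3) : Int) := by
      push_cast
      have : (2 ^ (j + 1) : Int) + 2 ^ (j + 1) = 2 ^ (j + 2) := by ring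
      have h23 : (2 ^ (j + 3) : Int) = 2 ^ (j + 2) + 2 ^ (j + 2) := by ring
      omega
    simp only [Function.comp_apply]
    rw [pvValue_window j _ h1 h2, if_pos]
    push_cast
    have : (3 : Int) * 2 ^ (j + 1) = 2 ^ (j + 2) + 2 ^ (j + 1) := by ring
    omega
  · rw [List.eq_replicate_iff]
    refine ⟨by simp, ?_⟩
    intro x hx
    rw [List.mem_map] at hx
    obtain ⟨k, hk, rfl⟩ := hx
    rw [List.mem_range] at hk
    have hk' : (k : Int) < 2 ^ (j + 1) := by exact_mod_cast hk
    have hhalf : (0 : Int) ≤ 2 ^ (j + 1) := by positivity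
    have h1 : (2 ^ (j + 2) : Int) ≤ ((2 ^ (j + 2) + (2 ^ (j + 1) + k) : Nat) : Int) := by
      push_cast; omega
    have h2 : ((2 ^ (j + 2) + (2 ^ (j + 1) + k) : Nat) : Int) < (2 ^ (j + 3) : Int) := by
      push_cast
      have : (2 ^ (j + 1) : Int) + 2 ^ (j + 1) = 2 ^ (j + 2) := by ring
      have h23 : (2 ^ (j + 3) : Int) = 2 ^ (j + 2) + 2 ^ (j + 2) := by ring
      omega
    simp only [Function.comp_apply]
    rw [pvValue_window j _ h1 h2, if_neg]
    · ring
    · push_cast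
      have : (3 : Int) * 2 ^ (j + 1) = 2 ^ (j + 2) + 2 ^ (j + 1) := by ring
      omega

-- the loop, started in the canonical state after j iterations, returns some cut of pvVals of length ≥ n
lemma pvLoopA_vals (n : Int) : ∀ (j : Nat) (hf : (0:Int) < 2 ^ (j + 1)),
    ∃ L : Nat, n ≤ (L : Int) ∧
      pvLoopA n (pvVals (2 ^ (j + 2))) ((2 ^ (j + 2) : Int) + 1) (2 ^ (j + 1)) hf = pvVals L := by
  intro j hf
  by_cases hc : ((pvVals (2 ^ (j + 2))).length : Int) < n
  · rw [pvLoopA, if_pos hc]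
    have htn : ((2 : Int) ^ (j + 1)).toNat = 2 ^ (j + 1) := by
      have : ((2 : Nat) ^ (j + 1) : Int) = (2 : Int) ^ (j + 1) := by push_cast; ring
      omega
    have hstep : pvVals (2 ^ (j + 2)) ++ List.replicate ((2:Int) ^ (j + 1)).toNat ((2 ^ (j + 2) : Int) + 1)
          ++ List.replicate ((2:Int) ^ (j + 1)).toNat ((2 ^ (j + 2) : Int) + 1 + 2 ^ (j + 1))
        = pvVals (2 ^ (j + 3)) := by
      rw [htn, pvVals_block j]
    have harith2 : (2 ^ (j + 1) : Int) * 2 = (2 ^ (j + 1 + 1) : Int) := by ring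
    obtain ⟨L, hL1, hL3⟩ := pvLoopA_vals n (j + 1) (by positivity)
    refine ⟨L, hL1, ?_⟩
    rw [show j + 1 + 2 = j + 3 from rfl] at hL3
    simp only [hstep, harith2]
    convert hL3 using 2
    ring
  · rw [pvLoopA, if_neg hc]
    refine ⟨2 ^ (j + 2), ?_, rfl⟩
    rw [pvVals_length] at hc
    omega
termination_by j => n.toNat - 2 ^ (j + 2)
decreasing_by
  rw [pvVals_length] at hc
  have h1 : (2:Nat) ^ (j + 2) < 2 ^ (j + 1 + 2) := by
    apply Nat.pow_lt_pow_right <;> omega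
  omega

lemma pvVals_four : pvVals 4 = [1, 2, 3, 4] := by decide

-- slices [:n] (0 ≤ n) of two cuts of pvVals, both of length ≥ n, agree
lemma pvSlice_vals_eq {n : Int} {L M : Nat} (hn : 0 ≤ n) (hL : n ≤ (L : Int)) (hM : n ≤ (M : Int)) :
    PySem.List.slice (pvVals L) none (some n) = PySem.List.slice (pvVals M) none (some n) := by
  rw [PySem.List.slice_to _ hn, PySem.List.slice_to _ hn]
  rw [pvVals_take (by omega : n.toNat ≤ L), pvVals_take (by omega : n.toNat ≤ M)]

-- ===== VERDICT (by name: the statement is the Claim_ definition above) =====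
theorem returnPlacementsByAttendees_spec : Claim_equal_returnPlacementsByAttendees := by
  intro n _
  unfold Spec_returnPlacementsByAttendees returnPlacementsByAttendees returnPlacementsByAttendees_alt
  have hB : (PySem.List.pyRange 0 (max 4 n) 1).map pvValue = pvVals (max 4 n).toNat := by
    rw [PySem.List.pyRange_one, List.map_map, pvVals]
    simp only [sub_zero]
    apply List.map_congr_left
    intro a _
    simp [Function.comp_apply]
  rw [hB]
  have hinit : ([1, 2, 3, 4] : List Int) = pvVals (2 ^ (0 + 2)) := by
    rw [show (2 ^ (0 + 2) : Nat) = 4 from rfl, pvVals_four]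
  have h5 : (5 : Int) = (2 ^ (0 + 2) : Int) + 1 := by norm_num
  by_cases hn : n ≤ 4
  · -- the loop body never runs and max 4 n = 4: both sides slice pvVals 4
    have hloop : pvLoopA n [1, 2, 3, 4] 5 2 (by norm_num) = pvVals 4 := by
      rw [pvLoopA, if_neg (by simp; omega), pvVals_four]
    rw [hloop, max_eq_left hn, show ((4 : Int)).toNat = 4 from rfl]
  · obtain ⟨L, hL1, hL3⟩ := pvLoopA_vals n 0 (by norm_num)
    have hloop : pvLoopA n [1, 2, 3, 4] 5 2 (by norm_num) = pvVals L := by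
      rw [hinit, h5]
      convert hL3 using 2
    rw [hloop]
    apply pvSlice_vals_eq (by omega) hL1
    rw [max_eq_right (by omega : (4:Int) ≤ n)]
    omega
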